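-- pv_equiv track=rewrite | github.com/tijko/CodeSignal | Edge-of-the-Ocean/AlmostIncSeq/AlmostIncSeq.py | solution
-- ===== SOURCE A (Python) =====
-- def increasing(seq: [int]) -> bool:
--     for i,v in enumerate(seq[:-1]):
--         if v >= seq[i+1]:
--             return False
--     return True
--
-- def solution(seq: [int]) -> bool:
--     for i,v in enumerate(seq[:-1]):
--         if v >= seq[i+1]:
--             test = seq[:]
--             test.pop(i)
--             # test on removal here or next
--             if increasing(test):
--                 return True
--             test = seq[:]
--             test.pop(i+1)
--             if increasing(test):
--                 return True
--             return False
--     return True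
-- ===== SOURCE B (Python) =====
-- def solution(seq):
--     drops = 0
--     first = 0
--     for i in range(len(seq) - 1):
--         if seq[i] >= seq[i + 1]:
--             if drops == 0:
--                 first = i
--             drops += 1
--     if drops == 0:
--         return True
--     if drops >= 2:
--         return False
--     i = first
--     return (i == 0 or seq[i - 1] < seq[i + 1]) or \
--            (i + 1 == len(seq) - 1 or seq[i] < seq[i + 2])
-- ===== Notes on version B (the rewrite author's own statement) =====
-- stated objective: alternative
-- what changed: Instead of copying the list twice and re-scanning the copies with a full increasing() check at the first violation, B makes one pass counting drops (seq[i] >= seq[i+1]) and remembering the first drop index, then decides with two O(1) neighbour comparisons; no list copies and no re-scan.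
import Mathlib
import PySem

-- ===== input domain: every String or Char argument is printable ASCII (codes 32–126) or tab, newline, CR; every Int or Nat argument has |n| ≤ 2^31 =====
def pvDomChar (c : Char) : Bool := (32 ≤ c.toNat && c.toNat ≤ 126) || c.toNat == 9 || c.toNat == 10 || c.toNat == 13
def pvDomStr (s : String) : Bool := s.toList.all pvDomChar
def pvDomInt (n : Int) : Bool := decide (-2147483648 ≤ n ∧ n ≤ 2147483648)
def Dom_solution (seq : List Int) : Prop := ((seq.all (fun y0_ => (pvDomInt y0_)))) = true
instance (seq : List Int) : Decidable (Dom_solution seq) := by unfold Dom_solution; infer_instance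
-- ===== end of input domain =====

-- B replaces A's copy-and-rescan at the first violation by a single pass counting drops
-- plus two neighbour comparisons (objective: alternative; no list copies or re-scans).


-- ===== PORT A =====
-- 'for i,v in enumerate(seq[:-1]): if v >= seq[i+1]' walks the adjacent pairs of seq;
-- it is ported as structural recursion over the list carrying the index i.
def increasing : List Int → Bool
  | a :: b :: rest => if b ≤ a then false else increasing (b :: rest)
  | _ => true

-- test = seq[:]; test.pop(i) is List.eraseIdx i on the full list; the early-return
-- chain (return True / return True / return False) is the Bool or of the two checks.
def solLoop (full : List Int) (i : Nat) : List Int → Bool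
  | a :: b :: rest =>
      if b ≤ a then increasing (full.eraseIdx i) || increasing (full.eraseIdx (i + 1))
      else solLoop full (i + 1) (b :: rest)
  | _ => true

def solution (seq : List Int) : Bool := solLoop seq 0 seq

-- ===== PORT B =====
-- Source B's 'for i in range(len(seq)-1)' over seq[i],seq[i+1] is ported as structural
-- recursion over the adjacent pairs carrying the same state (i, drops, first).
def bLoop : List Int → Nat → Nat → Nat → Nat × Nat
  | a :: b :: rest, i, drops, first =>
      if b ≤ a then bLoop (b :: rest) (i + 1) (drops + 1) (if drops = 0 then i else first)
      else bLoop (b :: rest) (i + 1) drops first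
  | _, _, drops, first => (drops, first)

def solution_alt (seq : List Int) : Bool :=
  let st := bLoop seq 0 0 0
  let drops := st.1
  let first := st.2
  if drops = 0 then true
  else if 2 ≤ drops then false
  else
    ((decide (first = 0)) || decide (seq.getD (first - 1) 0 < seq.getD (first + 1) 0)) ||
    ((decide (first + 1 = seq.length - 1)) || decide (seq.getD first 0 < seq.getD (first + 2) 0))

-- ===== PRECONDITION & SPEC =====
def Spec_solution (seq : List Int) (out : Bool) : Prop := out = solution_alt seq
instance (seq : List Int) (out : Bool) : Decidable (Spec_solution seq out) := by unfold Spec_solution; infer_instance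

-- ===== CLAIM (what is proved, stated in full; the proofs are below) =====
def Claim_equal_solution : Prop := ∀ (seq : List Int), Dom_solution seq → Spec_solution seq (solution seq)

-- ===== LEMMAS AND PROOFS =====

-- increasing l is the Chain' (· < ·) predicate
theorem increasing_iff (l : List Int) : increasing l = true ↔ List.IsChain (· < ·) l := by
  induction l with
  | nil => simp [increasing]
  | cons a l ih =>
    cases l with
    | nil => simp [increasing]
    | cons b rest =>
      by_cases h : b ≤ a
      · simp [increasing, h, List.isChain_cons_cons, show ¬ a < b by omega]
      · simp only [increasing, if_neg h, List.isChain_cons_cons, ih]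
        simp [show a < b by omega]

-- count of drops (adjacent non-increases)
def cnt : List Int → Nat
  | a :: b :: rest => (if b ≤ a then 1 else 0) + cnt (b :: rest)
  | _ => 0

theorem cnt_eq_zero_iff (l : List Int) : cnt l = 0 ↔ List.IsChain (· < ·) l := by
  induction l with
  | nil => simp [cnt]
  | cons a l ih =>
    cases l with
    | nil => simp [cnt]
    | cons b rest =>
      by_cases h : b ≤ a
      · simp [cnt, h, List.isChain_cons_cons, show ¬ a < b by omega]
      · simp only [cnt, if_neg h, List.isChain_cons_cons]
        simp [show a < b by omega, ih]

-- chain' input ⇒ the loops just run off the end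
theorem solLoop_chain (full : List Int) : ∀ (l : List Int) (i : Nat),
    List.IsChain (· < ·) l → solLoop full i l = true := by
  intro l
  induction l with
  | nil => intro i _; rfl
  | cons a l ih =>
    cases l with
    | nil => intro i _; rfl
    | cons b rest =>
      intro i hc
      rw [List.isChain_cons_cons] at hc
      simp only [solLoop, if_neg (by omega : ¬ b ≤ a)]
      exact ih (i + 1) hc.2

theorem bLoop_chain : ∀ (l : List Int) (i d f : Nat),
    List.IsChain (· < ·) l → bLoop l i d f = (d, f) := by
  intro l
  induction l with
  | nil => intro i d f _; rfl
  | cons a l ih =>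
    cases l with
    | nil => intro i d f _; rfl
    | cons b rest =>
      intro i d f hc
      rw [List.isChain_cons_cons] at hc
      simp only [bLoop, if_neg (by omega : ¬ b ≤ a)]
      exact ih (i + 1) d f hc.2

-- once drops ≠ 0, bLoop only counts further drops and never changes first
theorem bLoop_count : ∀ (l : List Int) (i d f : Nat), d ≠ 0 →
    bLoop l i d f = (d + cnt l, f) := by
  intro l
  induction l with
  | nil => intro i d f _; simp [bLoop, cnt]
  | cons a l ih =>
    cases l with
    | nil => intro i d f _; simp [bLoop, cnt]
    | cons b rest =>
      intro i d f hd
      by_cases h : b ≤ a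
      · simp only [bLoop, cnt, if_pos h, if_neg hd]
        rw [ih (i + 1) (d + 1) f (by omega)]
        rw [Nat.add_assoc]
      · simp only [bLoop, cnt, if_neg h]
        rw [ih (i + 1) d f hd]
        simp

-- skipping an increasing prefix pre (with first element of the remainder a)
theorem headOpt_append (pre : List Int) (a : Int) (l : List Int) :
    (pre ++ a :: l).head? = (pre ++ [a]).head? := by
  cases pre <;> simp

theorem solLoop_skip (full : List Int) : ∀ (pre : List Int) (a : Int) (l : List Int) (i : Nat),
    List.IsChain (· < ·) (pre ++ [a]) →
    solLoop full i (pre ++ a :: l) = solLoop full (i + pre.length) (a :: l) := by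
  intro pre
  induction pre with
  | nil => intro a l i _; simp
  | cons p pre ih =>
    intro a l i hc
    have hc' : List.IsChain (· < ·) (pre ++ [a]) := (List.isChain_cons.mp hc).2
    have hlt : ∀ y ∈ (pre ++ a :: l).head?, p < y := by
      rw [headOpt_append]
      exact (List.isChain_cons.mp hc).1
    cases hpre : pre ++ a :: l with
    | nil => exact absurd hpre (by simp)
    | cons q m =>
      have hpq : p < q := hlt q (by rw [hpre]; rfl)
      have : solLoop full i ((p :: pre) ++ a :: l) = solLoop full (i + 1) (pre ++ a :: l) := by
        simp only [List.cons_append, hpre, solLoop, if_neg (by omega : ¬ q ≤ p)]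
      have harith : i + (p :: pre).length = i + 1 + pre.length := by
        rw [List.length_cons]; omega
      rw [this, ih a l (i + 1) hc', harith]

theorem bLoop_skip : ∀ (pre : List Int) (a : Int) (l : List Int) (i d f : Nat),
    List.IsChain (· < ·) (pre ++ [a]) →
    bLoop (pre ++ a :: l) i d f = bLoop (a :: l) (i + pre.length) d f := by
  intro pre
  induction pre with
  | nil => intro a l i d f _; simp
  | cons p pre ih =>
    intro a l i d f hc
    have hc' : List.IsChain (· < ·) (pre ++ [a]) := (List.isChain_cons.mp hc).2
    have hlt : ∀ y ∈ (pre ++ a :: l).head?, p < y := by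
      rw [headOpt_append]
      exact (List.isChain_cons.mp hc).1
    cases hpre : pre ++ a :: l with
    | nil => exact absurd hpre (by simp)
    | cons q m =>
      have hpq : p < q := hlt q (by rw [hpre]; rfl)
      have : bLoop ((p :: pre) ++ a :: l) i d f = bLoop (pre ++ a :: l) (i + 1) d f := by
        simp only [List.cons_append, hpre, bLoop, if_neg (by omega : ¬ q ≤ p)]
      have harith : i + (p :: pre).length = i + 1 + pre.length := by
        rw [List.length_cons]; omega
      rw [this, ih a l (i + 1) d f hc', harith]

theorem eraseIdx_at (pre : List Int) (x : Int) (l : List Int) :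
    (pre ++ x :: l).eraseIdx pre.length = pre ++ l := by
  induction pre with
  | nil => rfl
  | cons p pre ih => simpa [List.eraseIdx] using ih

theorem getLast_getD (l : List Int) (h : l ≠ []) :
    l.getD (l.length - 1) 0 = l.getLast h := by
  induction l with
  | nil => simp at h
  | cons x xs ih =>
    cases xs with
    | nil => simp [List.getD]
    | cons y ys => simpa [List.getD] using ih (by simp)

-- every list is increasing or splits at its first drop
theorem decomp (seq : List Int) :
    List.IsChain (· < ·) seq ∨
    ∃ pre a b rest, seq = pre ++ a :: b :: rest ∧ List.IsChain (· < ·) (pre ++ [a]) ∧ b ≤ a := by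
  induction seq with
  | nil => left; simp
  | cons x l ih =>
    cases l with
    | nil => left; simp
    | cons y m =>
      by_cases hxy : y ≤ x
      · right; exact ⟨[], x, y, m, by simp, by simp, hxy⟩
      · rcases ih with hc | ⟨pre, a, b, rest, heq, hch, hba⟩
        · left; exact List.isChain_cons.mpr ⟨by intro z hz; simp at hz; omega, hc⟩
        · right
          refine ⟨x :: pre, a, b, rest, by rw [List.cons_append, ← heq], ?_, hba⟩
          rw [List.cons_append]
          refine List.isChain_cons.mpr ⟨?_, hch⟩
          intro z hz
          have hhead : (pre ++ [a]).head? = some y := by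
            rw [← headOpt_append pre a (b :: rest), ← heq]; rfl
          rw [hhead] at hz
          simp at hz; omega

-- if b::rest is not increasing (and b ≤ a), neither erase result is increasing
theorem not_inc_left (pre : List Int) (b : Int) (rest : List Int)
    (h : ¬ List.IsChain (· < ·) (b :: rest)) :
    increasing (pre ++ b :: rest) = false := by
  rw [← Bool.not_eq_true, increasing_iff]
  intro hc
  exact h (hc.sublist (List.sublist_append_right pre (b :: rest)))

theorem not_inc_right (pre : List Int) (a b : Int) (rest : List Int) (hba : b ≤ a)
    (h : ¬ List.IsChain (· < ·) (b :: rest)) :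
    increasing (pre ++ a :: rest) = false := by
  rw [← Bool.not_eq_true, increasing_iff]
  intro hc
  have hc' : List.IsChain (· < ·) (a :: rest) :=
    hc.sublist (List.sublist_append_right pre (a :: rest))
  rcases List.isChain_cons.mp hc' with ⟨hhd, hrest⟩
  apply h
  refine List.isChain_cons.mpr ⟨?_, hrest⟩
  intro y hy
  have := hhd y hy
  omega

-- ===== VERDICT (by name: the statement is the Claim_ definition above) =====
theorem solution_spec : Claim_equal_solution := by
  unfold Claim_equal_solution
  intro seq _
  unfold Spec_solution solution solution_alt
  rcases decomp seq with hc | ⟨pre, a, b, rest, heq, hch, hba⟩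
  · rw [solLoop_chain seq seq 0 hc, bLoop_chain seq 0 0 0 hc]
    simp
  · subst heq
    have hA : solLoop (pre ++ a :: b :: rest) 0 (pre ++ a :: b :: rest) =
        (increasing ((pre ++ a :: b :: rest).eraseIdx pre.length) ||
         increasing ((pre ++ a :: b :: rest).eraseIdx (pre.length + 1))) := by
      rw [solLoop_skip (pre ++ a :: b :: rest) pre a (b :: rest) 0 hch]
      simp only [Nat.zero_add, solLoop, if_pos hba]
    have hB : bLoop (pre ++ a :: b :: rest) 0 0 0 = (1 + cnt (b :: rest), pre.length) := by
      rw [bLoop_skip pre a (b :: rest) 0 0 0 hch]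
      simp only [Nat.zero_add, bLoop, if_pos hba, if_pos rfl]
      exact bLoop_count (b :: rest) (pre.length + 1) 1 pre.length (by omega)
    have hErase1 : (pre ++ a :: b :: rest).eraseIdx pre.length = pre ++ b :: rest :=
      eraseIdx_at pre a (b :: rest)
    have hErase2 : (pre ++ a :: b :: rest).eraseIdx (pre.length + 1) = pre ++ a :: rest := by
      have := eraseIdx_at (pre ++ [a]) b rest
      simpa using this
    rw [hA, hB, hErase1, hErase2]
    simp only
    by_cases hcnt : cnt (b :: rest) = 0
    · -- exactly one drop
      have hbr : List.IsChain (· < ·) (b :: rest) := (cnt_eq_zero_iff _).mp hcnt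
      rw [hcnt]
      simp only [if_neg (by omega : ¬ (1 + 0 = 0)), if_neg (by omega : ¬ 2 ≤ 1 + 0)]
      -- facts used on B's side
      have hgetA : (pre ++ a :: b :: rest).getD pre.length 0 = a := by
        rw [List.getD_append_right _ _ _ _ (le_refl _)]
        simp
      have hgetB : (pre ++ a :: b :: rest).getD (pre.length + 1) 0 = b := by
        rw [List.getD_append_right _ _ _ _ (by omega)]
        simp [show pre.length + 1 - pre.length = 1 by omega]
      have hlen : (pre ++ a :: b :: rest).length = pre.length + 2 + rest.length := by
        simp; omega
      have hpreChain : List.IsChain (· < ·) pre :=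
        hch.sublist (List.sublist_append_left pre [a])
      have hlastA : ∀ x ∈ pre.getLast?, x < a := by
        have := (List.isChain_append.mp hch).2.2
        intro x hx; exact this x hx a rfl
      -- first disjunct: increasing (pre ++ b :: rest) = (first = 0 || seq[first-1] < seq[first+1])
      have hD1 : increasing (pre ++ b :: rest) =
          ((decide (pre.length = 0)) || decide ((pre ++ a :: b :: rest).getD (pre.length - 1) 0 < (pre ++ a :: b :: rest).getD (pre.length + 1) 0)) := by
        cases hpre : pre with
        | nil =>
          simp [hpre, (increasing_iff _).mpr hbr]
        | cons p pre' =>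
          have hne : pre ≠ [] := by rw [hpre]; simp
          rw [← hpre]
          have hlast : (pre ++ a :: b :: rest).getD (pre.length - 1) 0 = pre.getLast hne := by
            rw [List.getD_append _ _ _ _ (by rw [hpre]; simp)]
            exact getLast_getD pre hne
          rw [hgetB, hlast]
          simp only [show pre.length = 0 ↔ False by rw [hpre]; simp, decide_eq_false_iff_not]
          by_cases hlb : pre.getLast hne < b
          · have : List.IsChain (· < ·) (pre ++ b :: rest) := by
              rw [List.isChain_append]
              refine ⟨hpreChain, hbr, ?_⟩
              intro x hx y hy
              simp at hy
              rw [List.getLast?_eq_getLast_of_ne_nil hne] at hx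
              simp at hx
              omega
            rw [(increasing_iff _).mpr this]
            simp [hlb]
          · have : ¬ List.IsChain (· < ·) (pre ++ b :: rest) := by
              intro hcc
              have := (List.isChain_append.mp hcc).2.2 (pre.getLast hne)
                (by simp [List.getLast?_eq_getLast_of_ne_nil hne]) b rfl
              omega
            have hf : increasing (pre ++ b :: rest) = false := by
              cases hinc : increasing (pre ++ b :: rest) with
              | false => rfl
              | true => exact absurd ((increasing_iff _).mp hinc) this
            rw [hf]
            simp [hlb]
      -- second disjunct
      have hD2 : increasing (pre ++ a :: rest) =
          ((decide (pre.length + 1 = (pre ++ a :: b :: rest).length - 1)) || decide ((pre ++ a :: b :: rest).getD pre.length 0 < (pre ++ a :: b :: rest).getD (pre.length + 2) 0)) := by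
        have hrestChain : List.IsChain (· < ·) rest := (List.isChain_cons.mp hbr).2
        cases hrest : rest with
        | nil =>
          have hc2 : List.IsChain (· < ·) (pre ++ [a]) := hch
          rw [hrest] at *
          rw [(increasing_iff _).mpr hc2]
          simp [hlen, hrest]
        | cons r rest' =>
          rw [← hrest]
          have hget2 : (pre ++ a :: b :: rest).getD (pre.length + 2) 0 = r := by
            rw [List.getD_append_right _ _ _ _ (by omega), hrest]
            simp [show pre.length + 2 - pre.length = 2 by omega]
          rw [hgetA, hget2]
          have hlenne : ¬ (pre.length + 1 = (pre ++ a :: b :: rest).length - 1) := by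
            rw [hlen, hrest]; simp only [List.length_cons]; omega
          simp only [hlenne, decide_eq_false_iff_not, not_false_iff]
          by_cases har : a < r
          · have : List.IsChain (· < ·) (pre ++ a :: rest) := by
              rw [List.isChain_append]
              refine ⟨hpreChain, ?_, ?_⟩
              · rw [hrest]
                refine List.isChain_cons.mpr ⟨?_, by rw [hrest] at hrestChain; exact hrestChain⟩
                intro y hy; simp at hy; omega
              · intro x hx y hy; simp at hy
                have := hlastA x hx; omega
            rw [(increasing_iff _).mpr this]
            simp [har]
          · have : ¬ List.IsChain (· < ·) (pre ++ a :: rest) := by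
              intro hcc
              have h2 : List.IsChain (· < ·) (a :: rest) :=
                hcc.sublist (List.sublist_append_right pre (a :: rest))
              have := (List.isChain_cons.mp h2).1 r (by rw [hrest]; rfl)
              omega
            have hf : increasing (pre ++ a :: rest) = false := by
              cases hinc : increasing (pre ++ a :: rest) with
              | false => rfl
              | true => exact absurd ((increasing_iff _).mp hinc) this
            rw [hf]
            simp [har]
      rw [hD1, hD2]
    · -- two or more drops: both sides false
      have hnbr : ¬ List.IsChain (· < ·) (b :: rest) := fun h => hcnt ((cnt_eq_zero_iff _).mpr h)
      rw [not_inc_left pre b rest hnbr, not_inc_right pre a b rest hba hnbr]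
      simp only [if_neg (by omega : ¬ (1 + cnt (b :: rest) = 0)),
        if_pos (by omega : 2 ≤ 1 + cnt (b :: rest))]
      simp
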